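-- pv_equiv track=rewrite | github.com/shiyu2011/ml | algo.py | unique_string_detect1
-- ===== SOURCE A (Python) =====
-- from typing import List, Tuple
--
-- def unique_string_detect1(st:str, k:int) -> List[str]:
--     if k ==0 or len(st) < k:
--         return []
--     l = 0
--     res = set()
--     freq={}
--     for r, c in enumerate(st):
--         freq[c] = freq.get(c,0) + 1
--         if r - l + 1 == k and len(freq) == k:
--             res.add(st[l:r+1])
--         if r - l + 1 >= k:
--             freq[st[l]] = freq.get(st[l], 0) - 1
--             if(freq[st[l]]<=0):
--                 del freq[st[l]]
--             l += 1
--     return list(res)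
-- ===== SOURCE B (Python) =====
-- def unique_string_detect1(st, k):
--     if k <= 0 or len(st) < k:
--         return []
--     res = set()
--     for i in range(len(st) - k + 1):
--         sub = st[i:i + k]
--         if len(set(sub)) == k:
--             res.add(sub)
--     return list(res)
-- ===== Notes on version B (the rewrite author's own statement) =====
-- stated objective: simpler
-- what changed: Replaced the sliding-window two-pointer loop with an incrementally maintained character-frequency dict by a direct scan over all start indices that slices each k-window and tests distinctness with len(set(sub)) == k.
import Mathlib
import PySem

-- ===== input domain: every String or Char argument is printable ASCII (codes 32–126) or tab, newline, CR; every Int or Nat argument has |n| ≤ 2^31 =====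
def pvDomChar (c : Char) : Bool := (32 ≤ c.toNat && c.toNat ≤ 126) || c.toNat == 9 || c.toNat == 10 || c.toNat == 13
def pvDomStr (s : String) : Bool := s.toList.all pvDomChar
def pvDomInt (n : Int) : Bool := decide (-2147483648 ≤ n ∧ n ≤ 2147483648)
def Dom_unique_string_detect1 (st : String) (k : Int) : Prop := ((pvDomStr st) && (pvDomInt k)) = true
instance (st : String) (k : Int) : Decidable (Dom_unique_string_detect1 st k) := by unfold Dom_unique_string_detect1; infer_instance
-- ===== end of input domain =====

-- B replaces A's sliding-window frequency-dict two-pointer loop by a direct per-window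
-- slice-and-test scan (simpler, not faster). A returns list(set); the two ports produce
-- the set in the same first-insertion order, so return-value equality is exact.

-- ===== PORT A =====
-- one step of A's 'for r, c in enumerate(st)' loop; state = (l, res, freq)
def uniqueStringStep (st : String) (k : Int)
    (s : Int × PySem.Set String × PySem.Dict Char Int) (rc : Int × Char) :
    Int × PySem.Set String × PySem.Dict Char Int :=
  let l := s.1
  let freq := (s.2.2).modify rc.2 0 (· + 1)
  let res := if rc.1 - l + 1 = k ∧ (freq.size : Int) = k
    then PySem.Set.add s.2.1 (PySem.Str.slice st (some l) (some (rc.1 + 1))) else s.2.1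
  if rc.1 - l + 1 ≥ k then
    -- st[l] is a length-1 string in Python; its single character is the dict key here
    let ch := PySem.List.pyGetD st.toList l ' '
    let freq := freq.modify ch 0 (· - 1)
    let freq := if freq.getD ch 0 ≤ 0 then freq.erase ch else freq
    (l + 1, res, freq)
  else (l, res, freq)

def unique_string_detect1 (st : String) (k : Int) : List String :=
  if k = 0 ∨ PySem.Str.len st < k then []
  else ((PySem.List.enumerate st.toList 0).foldl (uniqueStringStep st k)
      ((0 : Int), (PySem.Set.empty : PySem.Set String), (PySem.Dict.empty : PySem.Dict Char Int))).2.1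

-- ===== PORT B =====
def unique_string_detect1_alt (st : String) (k : Int) : List String :=
  if k ≤ 0 ∨ PySem.Str.len st < k then []
  else
    (PySem.List.pyRange 0 (PySem.Str.len st - k + 1) 1).foldl
      (fun res i =>
        let sub := PySem.Str.slice st (some i) (some (i + k))
        if PySem.Set.len (PySem.Set.ofList sub.toList) = k then PySem.Set.add res sub else res)
      (PySem.Set.empty : PySem.Set String)

-- ===== PRECONDITION & SPEC =====
def Spec_unique_string_detect1 (st : String) (k : Int) (out : List String) : Prop := out = unique_string_detect1_alt st k
instance (st : String) (k : Int) (out : List String) : Decidable (Spec_unique_string_detect1 st k out) := by unfold Spec_unique_string_detect1; infer_instance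

-- ===== CLAIM (what is proved, stated in full; the proofs are below) =====
def Claim_equal_unique_string_detect1 : Prop := ∀ (st : String) (k : Int), Dom_unique_string_detect1 st k → Spec_unique_string_detect1 st k (unique_string_detect1 st k)

-- ===== LEMMAS AND PROOFS =====

-- window of length K starting at j has K distinct characters
abbrev pvGood (st : String) (K : Nat) (j : Nat) : Prop :=
  (PySem.Set.ofList ((st.toList.drop j).take K)).length = K

-- the canonical result set: good windows added in order of their start index
def pvCR (st : String) (k : Int) (K : Nat) (t : Nat) : PySem.Set String :=
  (List.range t).foldl
    (fun res j =>
      if pvGood st K j then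
        PySem.Set.add res (PySem.Str.slice st (some (j : Int)) (some ((j : Int) + k)))
      else res) []

-- A's freq dict represents exactly the multiset of the current window w
def pvFreqInv (d : PySem.Dict Char Int) (w : List Char) : Prop :=
  d.keys.Nodup ∧ ∀ c, d.get? c = if w.count c = 0 then none else some ((w.count c : Nat) : Int)

theorem pv_get?_erase (d : PySem.Dict Char Int) (x ch : Char) :
    (d.erase ch).get? x = if x = ch then none else d.get? x := by
  obtain ⟨items⟩ := d
  induction items with
  | nil => simp [PySem.Dict.erase, PySem.Dict.get?]
  | cons p t ih =>
    obtain ⟨a, v⟩ := p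
    have hfe : (PySem.Dict.mk ((a, v) :: t) : PySem.Dict Char Int).erase ch
        = if a = ch then (PySem.Dict.mk t : PySem.Dict Char Int).erase ch
          else PySem.Dict.mk ((a, v) :: ((PySem.Dict.mk t : PySem.Dict Char Int).erase ch).items) := by
      simp only [PySem.Dict.erase, List.filter_cons]
      by_cases ha : a = ch <;> simp [ha]
    rw [hfe]
    by_cases ha : a = ch
    · subst ha
      rw [if_pos rfl, ih]
      by_cases hx : x = a
      · subst hx; simp
      · simp [hx, PySem.Dict.get?_mk_cons, show ¬ (a == x) = true by simp [Ne.symm hx]]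
    · rw [if_neg ha]
      by_cases hax : a = x
      · subst hax
        simp [PySem.Dict.get?_mk_cons, ha]
      · simp [PySem.Dict.get?_mk_cons, show ¬ (a == x) = true by simp [hax], ih]

theorem pv_keys_erase (d : PySem.Dict Char Int) (ch : Char) :
    (d.erase ch).keys = d.keys.filter (fun x => !(x == ch)) := by
  obtain ⟨items⟩ := d
  induction items with
  | nil => rfl
  | cons p t ih =>
    simp only [PySem.Dict.erase, PySem.Dict.keys, List.filter_cons, List.map_cons] at *
    by_cases hp : (!(p.1 == ch)) = true
    · simp [hp, ih]
    · simp at hp; simp [hp, ih]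

theorem pv_size_of_inv (d : PySem.Dict Char Int) (w : List Char) (h : pvFreqInv d w) :
    d.size = (PySem.Set.ofList w).length := by
  obtain ⟨hnd, hget⟩ := h
  have hmem : ∀ x : Char, x ∈ d.keys ↔ x ∈ PySem.Set.ofList w := by
    intro x
    rw [← PySem.Dict.contains_iff_mem_keys, PySem.Dict.contains_eq_isSome_get?, hget x,
        PySem.Set.mem_ofList]
    by_cases hc : w.count x = 0
    · simp [hc, List.count_eq_zero.mp hc]
    · simp [hc, List.count_pos_iff.mp (Nat.pos_of_ne_zero hc)]
  have hperm : d.keys.Perm (PySem.Set.ofList w) :=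
    (List.perm_ext_iff_of_nodup hnd (PySem.Set.nodup_ofList w)).mpr hmem
  have hl := hperm.length_eq
  simpa [PySem.Dict.size, PySem.Dict.keys] using hl

theorem pv_enumerate_append_singleton (xs : List Char) (x : Char) (s : Int) :
    PySem.List.enumerate (xs ++ [x]) s = PySem.List.enumerate xs s ++ [(s + xs.length, x)] := by
  induction xs generalizing s with
  | nil => simp [PySem.List.enumerate]
  | cons y t ih => simp [PySem.List.enumerate, ih]; ring

theorem pvCR_succ (st : String) (k : Int) (K t : Nat) :
    pvCR st k K (t + 1) =
      if pvGood st K t then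
        PySem.Set.add (pvCR st k K t) (PySem.Str.slice st (some (t : Int)) (some ((t : Int) + k)))
      else pvCR st k K t := by
  unfold pvCR; rw [List.range_succ, List.foldl_append]; rfl

-- the fold over the first m+1 characters is one step applied to the fold over the first m
theorem pv_F_succ (st : String) (k : Int) (m : Nat) (hm : m < st.toList.length)
    (init : Int × PySem.Set String × PySem.Dict Char Int) :
    (PySem.List.enumerate (st.toList.take (m + 1)) 0).foldl (uniqueStringStep st k) init
      = uniqueStringStep st k
          ((PySem.List.enumerate (st.toList.take m) 0).foldl (uniqueStringStep st k) init)
          (((m : Nat) : Int), st.toList[m]) := by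
  rw [List.take_add_one, List.getElem?_eq_getElem hm]
  simp only [Option.toList_some]
  rw [pv_enumerate_append_singleton, List.foldl_append]
  have hlen : (st.toList.take m).length = m := by
    rw [List.length_take]; omega
  rw [hlen]
  simp

-- a single step of A's loop for negative k: the window is emptied again at once
theorem pv_step_neg (st : String) (k : Int) (hk : k < 0) (m : Nat) (hm : m < st.toList.length) :
    uniqueStringStep st k
        (((m : Nat) : Int), (PySem.Set.empty : PySem.Set String), (PySem.Dict.empty : PySem.Dict Char Int))
        (((m : Nat) : Int), st.toList[m])
      = (((m + 1 : Nat) : Int), (PySem.Set.empty : PySem.Set String), (PySem.Dict.empty : PySem.Dict Char Int)) := by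
  have hc1 : ¬(((m : Nat) : Int) - ((m : Nat) : Int) + 1 = k) := by omega
  have hc2 : ((m : Nat) : Int) - ((m : Nat) : Int) + 1 ≥ k := by omega
  unfold uniqueStringStep
  simp only [hc1, false_and, if_false, ge_iff_le, hc2, if_true]
  rw [PySem.List.pyGetD_natCast, List.getD_eq_getElem _ _ hm]
  have hd1 : (PySem.Dict.empty : PySem.Dict Char Int).modify st.toList[m] 0 (· + 1)
      = PySem.Dict.mk [(st.toList[m], 1)] := by
    simp [PySem.Dict.modify, PySem.Dict.insert, PySem.Dict.contains, PySem.Dict.empty,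
      PySem.Dict.getD, PySem.Dict.get?]
  have hd2 : (PySem.Dict.mk [(st.toList[m], 1)] : PySem.Dict Char Int).modify st.toList[m] 0 (· - 1)
      = PySem.Dict.mk [(st.toList[m], 0)] := by
    simp [PySem.Dict.modify, PySem.Dict.insert, PySem.Dict.contains,
      PySem.Dict.getD, PySem.Dict.get?, List.find?]
  rw [hd1, hd2]
  have hgd : (PySem.Dict.mk [(st.toList[m], 0)] : PySem.Dict Char Int).getD st.toList[m] 0 = 0 := by
    simp [PySem.Dict.getD, PySem.Dict.get?, List.find?]
  rw [hgd, if_pos (le_refl (0 : Int))]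
  have her : (PySem.Dict.mk [(st.toList[m], 0)] : PySem.Dict Char Int).erase st.toList[m]
      = PySem.Dict.empty := by
    simp [PySem.Dict.erase, PySem.Dict.empty]
  rw [her, show ((m : Nat) : Int) + 1 = (((m + 1 : Nat)) : Int) from by push_cast; ring]

theorem pv_A_loop_neg (st : String) (k : Int) (hk : k < 0)
    (m : Nat) (hm : m ≤ st.toList.length) :
    (PySem.List.enumerate (st.toList.take m) 0).foldl (uniqueStringStep st k)
        ((0 : Int), (PySem.Set.empty : PySem.Set String), (PySem.Dict.empty : PySem.Dict Char Int))
      = (((m : Nat) : Int), (PySem.Set.empty : PySem.Set String), (PySem.Dict.empty : PySem.Dict Char Int)) := by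
  induction m with
  | zero => simp [PySem.List.enumerate]
  | succ m ih =>
    have hm' : m < st.toList.length := by omega
    rw [pv_F_succ st k m hm', ih (by omega), pv_step_neg st k hk m hm']

theorem pv_B_eq_CR (st : String) (k : Int) (K : Nat) (hk : k = (K : Int)) (hK : 1 ≤ K)
    (hn : K ≤ st.toList.length) :
    unique_string_detect1_alt st k = pvCR st k K (st.toList.length - K + 1) := by
  unfold unique_string_detect1_alt
  rw [if_neg (by rw [PySem.Str.len_eq]; omega)]
  rw [PySem.Str.len_eq]
  have hcast : ((st.toList.length : Int) - k + 1) = (((st.toList.length - K + 1 : Nat)) : Int) := by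
    omega
  rw [hcast, PySem.List.pyRange_zero_natCast, List.foldl_map]
  unfold pvCR
  apply PySem.List.foldl_congr_mem
  intro acc j hj
  simp only [PySem.Set.len, PySem.Str.toList_slice, PySem.Chars.slice_eq_listSlice]
  rw [hk, PySem.List.slice_natCast_add]
  by_cases hg : pvGood st K j
  · rw [if_pos (by exact_mod_cast hg), if_pos hg]
  · rw [if_neg (fun h => hg (by exact_mod_cast h)), if_neg hg]

-- the main loop invariant for A, positive k
theorem pv_A_loop (st : String) (k : Int) (K : Nat) (hk : k = (K : Int)) (hK : 1 ≤ K)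
    (m : Nat) (hm : m ≤ st.toList.length) :
    ∃ d, (PySem.List.enumerate (st.toList.take m) 0).foldl (uniqueStringStep st k)
        ((0 : Int), (PySem.Set.empty : PySem.Set String), (PySem.Dict.empty : PySem.Dict Char Int))
      = (((m + 1 - K : Nat) : Int), pvCR st k K (m + 1 - K), d)
      ∧ pvFreqInv d ((st.toList.drop (m + 1 - K)).take (m - (m + 1 - K))) := by
  induction m with
  | zero =>
    refine ⟨PySem.Dict.empty, ?_, ?_⟩
    · have h0 : 1 - K = 0 := by omega
      simp [PySem.List.enumerate, h0, pvCR]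
    · have h0 : 1 - K = 0 := by omega
      refine ⟨PySem.Dict.nodup_keys_empty, fun c => ?_⟩
      simp [PySem.Dict.get?_empty, h0]
  | succ m ih =>
    have hm' : m < st.toList.length := by omega
    obtain ⟨d, Hst, hnd, hget⟩ := ih (by omega)
    rw [pv_F_succ st k m hm', Hst]
    set L : Nat := m + 1 - K with hL
    set w : List Char := (st.toList.drop L).take (m - L) with hw
    set c : Char := st.toList[m] with hcdef
    have hgetD : d.getD c 0 = ((w.count c : Nat) : Int) := by
      rw [PySem.Dict.getD_eq_get?_getD, hget c]
      by_cases h0 : w.count c = 0 <;> simp [h0]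
    have hinv1 : pvFreqInv (d.modify c 0 (· + 1)) (w ++ [c]) := by
      refine ⟨by simpa [PySem.Dict.modify] using
        PySem.Dict.nodup_keys_insert d c (d.getD c 0 + 1) hnd, fun x => ?_⟩
      simp only [PySem.Dict.modify]
      rw [PySem.Dict.get?_insert]
      by_cases hx : x = c
      · subst hx
        simp [hgetD, List.count_append]
      · rw [if_neg hx, hget x]
        have hcx : (w ++ [c]).count x = w.count x := by
          simp [List.count_append, Ne.symm hx]
        rw [hcx]
    have hLle : L ≤ m := by omega
    have hidx : m - L < (st.toList.drop L).length := by
      rw [List.length_drop, hL]; omega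
    have hwm : w ++ [c] = (st.toList.drop L).take (m - L + 1) := by
      rw [hw, ← List.take_concat_get hidx, List.concat_eq_append]
      congr 2
      rw [List.getElem_drop]
      have hLm : L + (m - L) = m := by rw [hL]; omega
      simp [hcdef, hLm]
    by_cases hkm : K ≤ m + 1
    · -- the window has reached length K: test, maybe record, then slide
      have hLv : m - L + 1 = K := by omega
      have hw' : w ++ [c] = (st.toList.drop L).take K := by rw [hwm, hLv]
      have hsize : (d.modify c 0 (· + 1)).size
          = (PySem.Set.ofList ((st.toList.drop L).take K)).length := by
        rw [← hw']; exact pv_size_of_inv _ _ hinv1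
      have hc1 : ((m : Nat) : Int) - ((L : Nat) : Int) + 1 = k := by omega
      have hc2 : ((m : Nat) : Int) - ((L : Nat) : Int) + 1 ≥ k := by omega
      have hLlt : L < st.toList.length := by omega
      have hch : PySem.List.pyGetD st.toList ((L : Nat) : Int) ' ' = st.toList[L] := by
        rw [PySem.List.pyGetD_natCast, List.getD_eq_getElem _ _ hLlt]
      have hsplit : (st.toList.drop L).take K
          = st.toList[L] :: (st.toList.drop (L + 1)).take (K - 1) := by
        conv_lhs => rw [show K = (K - 1) + 1 from by omega, List.drop_eq_getElem_cons hLlt]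
        rw [List.take_succ_cons]
      have hcnt : ((st.toList.drop L).take K).count st.toList[L]
          = ((st.toList.drop (L + 1)).take (K - 1)).count st.toList[L] + 1 := by
        rw [hsplit]; simp [List.count_cons]
      have hcntx : ∀ x : Char, x ≠ st.toList[L] →
          ((st.toList.drop L).take K).count x = ((st.toList.drop (L + 1)).take (K - 1)).count x := by
        intro x hx; rw [hsplit, List.count_cons]; simp [Ne.symm hx]
      have hd1get : (d.modify c 0 (· + 1)).getD st.toList[L] 0
          = ((((st.toList.drop L).take K).count st.toList[L] : Nat) : Int) := by
        rw [PySem.Dict.getD_eq_get?_getD, hinv1.2 st.toList[L], hw']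
        have hne : ((st.toList.drop L).take K).count st.toList[L] ≠ 0 := by omega
        simp [hne]
      have hiff : (((d.modify c 0 (· + 1)).size : Nat) : Int) = k ↔ pvGood st K L := by
        rw [hsize, hk]
        unfold pvGood
        exact ⟨fun h => by exact_mod_cast h, fun h => by exact_mod_cast h⟩
      have harg : ((m : Nat) : Int) + 1 = ((L : Nat) : Int) + k := by omega
      have hres : (if ((m : Nat) : Int) - ((L : Nat) : Int) + 1 = k
            ∧ (((d.modify c 0 (· + 1)).size : Nat) : Int) = k
          then PySem.Set.add (pvCR st k K L)
            (PySem.Str.slice st (some ((L : Nat) : Int)) (some (((m : Nat) : Int) + 1)))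
          else pvCR st k K L) = pvCR st k K (L + 1) := by
        rw [pvCR_succ, harg]
        by_cases hg : pvGood st K L
        · rw [if_pos ⟨hc1, hiff.mpr hg⟩, if_pos hg]
        · rw [if_neg (fun h => hg (hiff.mp h.2)), if_neg hg]
      have hstep : uniqueStringStep st k (((L : Nat) : Int), pvCR st k K L, d) (((m : Nat) : Int), c)
          = ((((L + 1 : Nat)) : Int), pvCR st k K (L + 1),
             if ((d.modify c 0 (· + 1)).modify st.toList[L] 0 (· - 1)).getD st.toList[L] 0 ≤ 0
             then ((d.modify c 0 (· + 1)).modify st.toList[L] 0 (· - 1)).erase st.toList[L]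
             else (d.modify c 0 (· + 1)).modify st.toList[L] 0 (· - 1)) := by
        unfold uniqueStringStep
        simp only [ge_iff_le]
        rw [if_pos (by exact hc2), hch, hres,
          show ((L : Nat) : Int) + 1 = (((L + 1 : Nat)) : Int) from by push_cast; ring]
      rw [hstep]
      have h2 : m + 1 + 1 - K = L + 1 := by omega
      have h3 : m + 1 - (L + 1) = K - 1 := by omega
      rw [h2, h3]
      refine ⟨_, rfl, ?_⟩
      have hgdval : ((d.modify c 0 (· + 1)).modify st.toList[L] 0 (· - 1)).getD st.toList[L] 0
          = ((((st.toList.drop (L + 1)).take (K - 1)).count st.toList[L] + 1 : Nat) : Int) - 1 := by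
        conv_lhs => rw [PySem.Dict.modify]
        rw [PySem.Dict.getD_insert_self, hd1get, hcnt]
      by_cases hz : ((st.toList.drop (L + 1)).take (K - 1)).count st.toList[L] = 0
      · -- the leftmost character has count 0 afterwards: it is deleted from freq
        have hgd2 : ((d.modify c 0 (· + 1)).modify st.toList[L] 0 (· - 1)).getD st.toList[L] 0 ≤ 0 := by
          rw [hgdval]; push_cast; omega
        rw [if_pos hgd2]
        refine ⟨?_, fun x => ?_⟩
        · rw [pv_keys_erase]
          refine List.Nodup.filter _ ?_
          simp only [PySem.Dict.modify]
          exact PySem.Dict.nodup_keys_insert _ _ _ (PySem.Dict.nodup_keys_insert _ _ _ hnd)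
        · rw [pv_get?_erase]
          by_cases hx : x = st.toList[L]
          · rw [if_pos hx, hx]
            simp [hz]
          · rw [if_neg hx]
            have hg1 := hinv1.2 x
            rw [hw'] at hg1
            simp only [PySem.Dict.modify] at hg1 ⊢
            rw [PySem.Dict.get?_insert, if_neg hx, hg1, hcntx x hx]
      · -- the leftmost character still occurs: only its count drops by one
        have hgd2 : ¬ ((d.modify c 0 (· + 1)).modify st.toList[L] 0 (· - 1)).getD st.toList[L] 0 ≤ 0 := by
          rw [hgdval]; push_cast; omega
        rw [if_neg hgd2]
        refine ⟨?_, fun x => ?_⟩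
        · simp only [PySem.Dict.modify]
          exact PySem.Dict.nodup_keys_insert _ _ _ (PySem.Dict.nodup_keys_insert _ _ _ hnd)
        · by_cases hx : x = st.toList[L]
          · conv_lhs => rw [PySem.Dict.modify]
            rw [hx, PySem.Dict.get?_insert, if_pos rfl, hd1get, hcnt]
            have hcast1 : ((((st.toList.drop (L + 1)).take (K - 1)).count st.toList[L] + 1 : Nat) : Int) - 1
                = ((((st.toList.drop (L + 1)).take (K - 1)).count st.toList[L] : Nat) : Int) := by
              push_cast; ring
            rw [hcast1]
            simp [hz]
          · conv_lhs => rw [PySem.Dict.modify]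
            rw [PySem.Dict.get?_insert, if_neg hx]
            have hg1 := hinv1.2 x
            rw [hw'] at hg1
            rw [hg1, hcntx x hx]
    · -- the window is still growing: no test, no slide
      have hL0 : L = 0 := by omega
      have hc1 : ¬(((m : Nat) : Int) - ((L : Nat) : Int) + 1 = k) := by omega
      have hc2 : ¬(((m : Nat) : Int) - ((L : Nat) : Int) + 1 ≥ k) := by omega
      unfold uniqueStringStep
      simp only [ge_iff_le]
      rw [if_neg (by exact fun h => hc2 h)]
      refine ⟨d.modify c 0 (· + 1), ?_, ?_⟩
      · have hL1 : m + 1 + 1 - K = L := by omega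
        simp only [hc1, false_and, if_false, hL1]
      · have hL1 : m + 1 + 1 - K = L := by omega
        rw [hL1]
        have hstep1 : m + 1 - L = m - L + 1 := by omega
        rw [hstep1, ← hwm]
        exact hinv1

-- ===== VERDICT (by name: the statement is the Claim_ definition above) =====
theorem unique_string_detect1_spec : Claim_equal_unique_string_detect1 := by
  intro st k _
  unfold Spec_unique_string_detect1
  unfold unique_string_detect1
  by_cases h0 : k = 0 ∨ PySem.Str.len st < k
  · rw [if_pos h0]
    unfold unique_string_detect1_alt
    rw [if_pos ?_]
    rcases h0 with h | h
    · exact Or.inl (by omega)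
    · exact Or.inr h
  · rw [if_neg h0]
    push_neg at h0
    obtain ⟨hk0, hlen⟩ := h0
    rw [PySem.Str.len_eq] at hlen
    rcases lt_or_gt_of_ne hk0 with hneg | hpos
    · have hres := pv_A_loop_neg st k hneg st.toList.length le_rfl
      rw [List.take_length] at hres
      rw [hres]
      unfold unique_string_detect1_alt
      rw [if_pos (Or.inl (by omega))]
      rfl
    · have hk : k = ((k.toNat : Nat) : Int) := by omega
      have hK : 1 ≤ k.toNat := by omega
      have hn : k.toNat ≤ st.toList.length := by omega
      obtain ⟨d, Hst, -⟩ := pv_A_loop st k k.toNat hk hK st.toList.length le_rfl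
      rw [List.take_length] at Hst
      rw [Hst]
      have h1 : st.toList.length + 1 - k.toNat = st.toList.length - k.toNat + 1 := by omega
      rw [pv_B_eq_CR st k k.toNat hk hK hn, ← h1]
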